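-- pv_equiv track=rewrite | github.com/lapeko/algoexpert | algorithms/arrays/20-sweet-and-savory/1.py | sweetAndSavory
-- ===== SOURCE A (Python) =====
-- def sweetAndSavory(dishes, target):
--     result = [0, 0]
--     dishes.sort()
--     left, right = 0, len(dishes) - 1
--     bestFlawor = float("-inf")
--     while left < right and dishes[left] < 0 and dishes[right] > 0:
--         if dishes[left] + dishes[right] > target:
--             right -= 1
--         else:
--             if bestFlawor < dishes[left] + dishes[right]:
--                 bestFlawor = dishes[left] + dishes[right]
--                 result = [dishes[left], dishes[right]]
--             left += 1
--     return result
-- ===== SOURCE B (Python) =====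
-- def sweetAndSavory(dishes, target):
--     # Sort in place (same side effect as A), split into sweets and savories, then
--     # for each sweet binary-search the savories for the largest one keeping the
--     # sum <= target; keep the best pair under a strict-improvement test.
--     dishes.sort()
--     sweets = [d for d in dishes if d < 0]
--     savories = [d for d in dishes if d > 0]
--     best = None
--     result = [0, 0]
--     for s in sweets:
--         lo, hi = 0, len(savories)
--         while lo < hi:
--             mid = (lo + hi) // 2
--             if savories[mid] <= target - s:
--                 lo = mid + 1
--             else:
--                 hi = mid
--         if lo > 0:
--             v = savories[lo - 1]
--             if best is None or best < s + v:
--                 best = s + v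
--                 result = [s, v]
--     return result
-- ===== Notes on version B (the rewrite author's own statement) =====
-- stated objective: alternative
-- what changed: Replaced A's single two-pointer sweep by sorting, splitting into sweets and savories, and binary-searching the savories per sweet for the largest one with sum <= target, keeping the best pair via a strict-improvement test (same in-place sort side effect).
import Mathlib
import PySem

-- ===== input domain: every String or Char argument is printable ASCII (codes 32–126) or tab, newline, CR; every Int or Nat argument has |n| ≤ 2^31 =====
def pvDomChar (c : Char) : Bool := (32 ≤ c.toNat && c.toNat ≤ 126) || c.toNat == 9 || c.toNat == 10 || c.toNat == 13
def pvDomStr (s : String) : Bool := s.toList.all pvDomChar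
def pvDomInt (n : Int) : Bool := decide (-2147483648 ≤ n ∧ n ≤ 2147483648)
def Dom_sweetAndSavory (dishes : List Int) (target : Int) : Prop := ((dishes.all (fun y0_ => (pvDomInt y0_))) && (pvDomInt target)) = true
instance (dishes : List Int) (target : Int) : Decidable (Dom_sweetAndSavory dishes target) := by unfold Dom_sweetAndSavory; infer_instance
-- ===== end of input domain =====

-- B replaces A's two-pointer sweep by splitting the sorted list into sweets and
-- savories and binary-searching the savories per sweet (alternative decomposition,
-- similar cost). Both Pythons sort `dishes` in place; the equivalence proved here
-- is about the return value (the mutation is identical anyway).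

-- ===== PORT A =====
-- A's `bestFlawor = float("-inf")` is modelled as `none` (the test `bestFlawor < x`
-- is then always true); `pvNoneLt` is exactly that comparison.
def pvNoneLt (b : Option Int) (x : Int) : Bool :=
  match b with
  | none => true
  | some m => decide (m < x)

-- the while-loop of A; the guard guarantees both indices are in range, so pyGetD's
-- default 0 is never used.
def pvLoopA (ds : List Int) (target l r : Int) (best : Option Int) (result : List Int) : List Int :=
  if h : l < r ∧ PySem.List.pyGetD ds l 0 < 0 ∧ 0 < PySem.List.pyGetD ds r 0 then
    if target < PySem.List.pyGetD ds l 0 + PySem.List.pyGetD ds r 0 then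
      pvLoopA ds target l (r - 1) best result
    else
      if pvNoneLt best (PySem.List.pyGetD ds l 0 + PySem.List.pyGetD ds r 0) then
        pvLoopA ds target (l + 1) r (some (PySem.List.pyGetD ds l 0 + PySem.List.pyGetD ds r 0))
          [PySem.List.pyGetD ds l 0, PySem.List.pyGetD ds r 0]
      else
        pvLoopA ds target (l + 1) r best result
  else result
termination_by (r - l).toNat
decreasing_by all_goals omega

def sweetAndSavory (dishes : List Int) (target : Int) : List Int :=
  let ds := PySem.List.sorted dishes (fun x => x) false
  pvLoopA ds target 0 ((ds.length : Int) - 1) none [0, 0]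

-- ===== PORT B =====
-- B's inner `while lo < hi` binary search; the guard keeps `mid` in range, so
-- pyGetD's default 0 is never used.
def pvBisect (sav : List Int) (x : Int) (lo hi : Int) : Int :=
  if _h : lo < hi then
    if PySem.List.pyGetD sav (PySem.Int.floordiv (lo + hi) 2) 0 ≤ x then
      pvBisect sav x (PySem.Int.floordiv (lo + hi) 2 + 1) hi
    else
      pvBisect sav x lo (PySem.Int.floordiv (lo + hi) 2)
  else lo
termination_by (hi - lo).toNat
decreasing_by
  all_goals
    have h1 : lo ≤ PySem.Int.floordiv (lo + hi) 2 ∧ PySem.Int.floordiv (lo + hi) 2 ≤ hi :=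
      PySem.Int.floordiv_two_mid_bounds (by omega)
    have h2 : PySem.Int.floordiv (lo + hi) 2 < hi :=
      (PySem.Int.floordiv_lt_iff_lt_mul (by omega)).mpr (by omega)
    omega

-- the body of B's `for s in sweets` loop: binary search, then strict improvement
def pvStepB (target s : Int) (st : Option Int × List Int) (sav : List Int) :
    Option Int × List Int :=
  let lo := pvBisect sav (target - s) 0 (sav.length : Int)
  if 0 < lo then
    if pvNoneLt st.1 (s + PySem.List.pyGetD sav (lo - 1) 0) = true then
      (some (s + PySem.List.pyGetD sav (lo - 1) 0), [s, PySem.List.pyGetD sav (lo - 1) 0])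
    else st
  else st

def sweetAndSavory_alt (dishes : List Int) (target : Int) : List Int :=
  let ds := PySem.List.sorted dishes (fun x => x) false
  let sweets := ds.filter (fun d => d < 0)
  let savories := ds.filter (fun d => 0 < d)
  (sweets.foldl (fun st s => pvStepB target s st savories) (none, [0, 0])).2

-- ===== PRECONDITION & SPEC =====
def Spec_sweetAndSavory (dishes : List Int) (target : Int) (out : List Int) : Prop := out = sweetAndSavory_alt dishes target
instance (dishes : List Int) (target : Int) (out : List Int) : Decidable (Spec_sweetAndSavory dishes target out) := by unfold Spec_sweetAndSavory; infer_instance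

-- ===== CLAIM (what is proved, stated in full; the proofs are below) =====
def Claim_equal_sweetAndSavory : Prop := ∀ (dishes : List Int) (target : Int), Dom_sweetAndSavory dishes target → Spec_sweetAndSavory dishes target (sweetAndSavory dishes target)

-- ===== LEMMAS AND PROOFS =====

-- sorted lists: later entries are at least as large
lemma pvSorted_getElem_mono {ds : List Int} (hpw : ds.Pairwise (· ≤ ·)) {i j : Nat}
    (hij : i ≤ j) (hj : j < ds.length) : ds[i]'(by omega) ≤ ds[j] := by
  rcases eq_or_lt_of_le hij with rfl | hlt
  · exact le_refl _
  · exact (List.pairwise_iff_getElem.mp hpw) i j (by omega) hj hlt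

lemma pvMem_drop_ge {ds : List Int} (hpw : ds.Pairwise (· ≤ ·)) {l : Nat}
    (hl : l < ds.length) {x : Int} (hx : x ∈ ds.drop l) : ds[l] ≤ x := by
  have hdrop : ds.drop l = ds[l] :: ds.drop (l + 1) := List.drop_eq_getElem_cons hl
  have hpw' : (ds.drop l).Pairwise (· ≤ ·) :=
    List.Pairwise.sublist (List.drop_sublist l ds) hpw
  rw [hdrop] at hpw' hx
  rcases List.mem_cons.mp hx with rfl | hx
  · exact le_refl _
  · exact (List.pairwise_cons.mp hpw').1 x hx

-- the binary search returns the split point of `· ≤ x` on a sorted list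
lemma pvBisect_spec (sav : List Int) (x : Int) (hpw : sav.Pairwise (· ≤ ·)) :
    ∀ fuel : Nat, ∀ lo hi : Int,
      (hi - lo).toNat ≤ fuel → 0 ≤ lo → lo ≤ hi → hi ≤ (sav.length : Int) →
      (∀ i : Nat, (i : Int) < lo → (hi' : i < sav.length) → sav[i] ≤ x) →
      (∀ i : Nat, hi ≤ (i : Int) → (hi' : i < sav.length) → x < sav[i]) →
      lo ≤ pvBisect sav x lo hi ∧ pvBisect sav x lo hi ≤ hi ∧
      (∀ i : Nat, (i : Int) < pvBisect sav x lo hi → (hi' : i < sav.length) → sav[i] ≤ x) ∧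
      (∀ i : Nat, pvBisect sav x lo hi ≤ (i : Int) → (hi' : i < sav.length) → x < sav[i]) := by
  intro fuel
  induction fuel with
  | zero =>
    intro lo hi hfuel h0 hline hhi hlow hhigh
    rw [pvBisect, dif_neg (by omega)]
    exact ⟨le_refl _, by omega, hlow, fun i hi1 hi2 => hhigh i (by omega) hi2⟩
  | succ fuel ih =>
    intro lo hi hfuel h0 hline hhi hlow hhigh
    rw [pvBisect]
    by_cases hg : lo < hi
    · rw [dif_pos hg]
      have hmid : lo ≤ PySem.Int.floordiv (lo + hi) 2 ∧ PySem.Int.floordiv (lo + hi) 2 ≤ hi :=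
        PySem.Int.floordiv_two_mid_bounds (by omega)
      have hmlt : PySem.Int.floordiv (lo + hi) 2 < hi :=
        (PySem.Int.floordiv_lt_iff_lt_mul (by omega)).mpr (by omega)
      set mid := PySem.Int.floordiv (lo + hi) 2 with hmiddef
      have hmn : mid.toNat < sav.length := by omega
      have em : PySem.List.pyGetD sav mid 0 = sav[mid.toNat] :=
        PySem.List.pyGetD_eq_getElem sav 0 (by omega) (by omega)
      rw [em]
      by_cases hle : sav[mid.toNat] ≤ x
      · rw [if_pos hle]
        obtain ⟨ha, hb, hc, hd⟩ := ih (mid + 1) hi (by omega) (by omega) (by omega) hhi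
          (by
            intro i hi1 hi2
            by_cases hcase : (i : Int) < lo
            · exact hlow i hcase hi2
            · have : sav[i] ≤ sav[mid.toNat] := pvSorted_getElem_mono hpw (by omega) hmn
              omega)
          hhigh
        exact ⟨by omega, hb, hc, hd⟩
      · rw [if_neg hle]
        obtain ⟨ha, hb, hc, hd⟩ := ih lo mid (by omega) h0 (by omega) (by omega) hlow
          (by
            intro i hi1 hi2
            by_cases hcase : hi ≤ (i : Int)
            · exact hhigh i hcase hi2
            · have : sav[mid.toNat] ≤ sav[i] := pvSorted_getElem_mono hpw (by omega) hi2
              omega)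
        exact ⟨ha, by omega, hc, hd⟩
    · rw [dif_neg hg]
      exact ⟨le_refl _, by omega, hlow, fun i hi1 hi2 => hhigh i (by omega) hi2⟩

-- B's loop body is the identity when no savory is feasible for s
lemma pvStepB_nofeas (target s : Int) (sav : List Int) (hpw : sav.Pairwise (· ≤ ·))
    (st : Option Int × List Int) (h : ∀ v ∈ sav, target < s + v) :
    pvStepB target s st sav = st := by
  obtain ⟨hlo, hhi, hlow, -⟩ := pvBisect_spec sav (target - s) hpw
    (sav.length) 0 (sav.length : Int) (by omega) (by omega) (by omega) (by omega)
    (by intro i hi1 hi2; omega) (by intro i hi1 hi2; omega)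
  rw [pvStepB]
  rw [if_neg]
  intro hpos
  have h0 : (0 : Nat) < sav.length := by omega
  have := hlow 0 (by omega) h0
  have := h sav[0] (List.getElem_mem h0)
  omega

-- B's loop body updates with the maximal feasible savory
lemma pvStepB_update (target s vmax : Int) (sav : List Int) (hpw : sav.Pairwise (· ≤ ·))
    (st : Option Int × List Int) (hmem : vmax ∈ sav) (hfeas : s + vmax ≤ target)
    (hub : ∀ v ∈ sav, s + v ≤ target → v ≤ vmax) :
    pvStepB target s st sav =
      if pvNoneLt st.1 (s + vmax) = true then (some (s + vmax), [s, vmax]) else st := by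
  obtain ⟨hlo, hhi, hlow, hhigh⟩ := pvBisect_spec sav (target - s) hpw
    (sav.length) 0 (sav.length : Int) (by omega) (by omega) (by omega) (by omega)
    (by intro i hi1 hi2; omega) (by intro i hi1 hi2; omega)
  set L := pvBisect sav (target - s) 0 (sav.length : Int) with hLdef
  obtain ⟨j, hj, hjv⟩ := List.mem_iff_getElem.mp hmem
  have hjL : (j : Int) < L := by
    by_contra hc
    have := hhigh j (by omega) hj
    omega
  have hLpos : 0 < L := by omega
  have hLn : (L - 1).toNat < sav.length := by omega
  have eL : PySem.List.pyGetD sav (L - 1) 0 = sav[(L - 1).toNat] :=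
    PySem.List.pyGetD_eq_getElem sav 0 (by omega) (by omega)
  have hveq : sav[(L - 1).toNat] = vmax := by
    have h1 : sav[(L - 1).toNat] ≤ target - s := hlow ((L - 1).toNat) (by omega) hLn
    have h2 : sav[(L - 1).toNat] ≤ vmax :=
      hub _ (List.getElem_mem hLn) (by omega)
    have h3 : sav[j] ≤ sav[(L - 1).toNat] := pvSorted_getElem_mono hpw (by omega) hLn
    omega
  rw [pvStepB]
  rw [if_pos hLpos, eL, hveq]

-- the outer fold is the identity when no pair is feasible
lemma pvOuter_id (target : Int) (sav sweets : List Int) (hpw : sav.Pairwise (· ≤ ·))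
    (st : Option Int × List Int)
    (h : ∀ s ∈ sweets, ∀ v ∈ sav, target < s + v) :
    sweets.foldl (fun st s => pvStepB target s st sav) st = st := by
  induction sweets generalizing st with
  | nil => rfl
  | cons s rest ih =>
      simp only [List.foldl_cons]
      rw [pvStepB_nofeas target s sav hpw st (h s (by simp))]
      exact ih st (fun w hw => h w (by simp [hw]))

-- guard failure: every remaining pair is infeasible, so the fold is the identity
lemma pvLoopA_exit (ds : List Int) (target : Int) (hpw : ds.Pairwise (· ≤ ·))
    {l r : Int} (best : Option Int) (result : List Int)
    (hl : 0 ≤ l) (hr : r ≤ (ds.length : Int) - 1)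
    (Hexcl : ∀ i : Nat, (hi : i < ds.length) → (r < (i : Int)) → 0 < ds[i] →
      ∀ s ∈ (ds.drop l.toNat).filter (fun d => decide (d < 0)), target < s + ds[i])
    (hguard : ¬ (l < r ∧ PySem.List.pyGetD ds l 0 < 0 ∧ 0 < PySem.List.pyGetD ds r 0)) :
    ((ds.drop l.toNat).filter (fun d => decide (d < 0))).foldl
      (fun st s => pvStepB target s st (ds.filter (fun d => decide (0 < d))))
      (best, result) = (best, result) := by
  by_cases hrem : (ds.drop l.toNat).filter (fun d => decide (d < 0)) = []
  · rw [hrem]; rfl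
  · obtain ⟨x, hx⟩ := List.exists_mem_of_ne_nil _ hrem
    have hxd : x ∈ ds.drop l.toNat := (List.mem_filter.mp hx).1
    have hxneg : x < 0 := by simpa using (List.mem_filter.mp hx).2
    have hln : l.toNat < ds.length := by
      by_contra hc
      rw [List.drop_eq_nil_of_le (by omega)] at hxd
      cases hxd
    have hdl : ds[l.toNat] < 0 := lt_of_le_of_lt (pvMem_drop_ge hpw hln hxd) hxneg
    have el : PySem.List.pyGetD ds l 0 = ds[l.toNat] :=
      PySem.List.pyGetD_eq_getElem ds 0 hl (by omega)
    apply pvOuter_id target _ _ (List.Pairwise.sublist List.filter_sublist hpw)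
    intro s hs v hv
    have hvds : v ∈ ds := (List.mem_filter.mp hv).1
    have hvpos : 0 < v := by simpa using (List.mem_filter.mp hv).2
    obtain ⟨i, hi, hiv⟩ := List.mem_iff_getElem.mp hvds
    have hri : r < (i : Int) := by
      by_contra hc
      push Not at hc
      rcases not_and_or.mp hguard with h1 | h23
      · -- r ≤ l : index i would be in the negative prefix
        have : ds[i] ≤ ds[l.toNat] := pvSorted_getElem_mono hpw (by omega) hln
        omega
      · rcases not_and_or.mp h23 with h2 | h3
        · rw [el] at h2; omega
        · -- dishes[right] ≤ 0 : index i is below right, hence non-positive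
          push Not at h3
          have hr0 : 0 ≤ r := by omega
          have hrn : r.toNat < ds.length := by omega
          have er : PySem.List.pyGetD ds r 0 = ds[r.toNat] :=
            PySem.List.pyGetD_eq_getElem ds 0 (by omega) (by omega)
          rw [er] at h3
          have : ds[i] ≤ ds[r.toNat] := pvSorted_getElem_mono hpw (by omega) hrn
          omega
    have := Hexcl i hi hri (by omega) s hs
    omega

-- main loop lemma: A's two-pointer loop computes B's fold over the remaining sweets
lemma pvLoopA_eq (ds : List Int) (target : Int) (hpw : ds.Pairwise (· ≤ ·)) :
    ∀ fuel : Nat, ∀ l r : Int, ∀ best result,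
      (r - l).toNat ≤ fuel → 0 ≤ l → r ≤ (ds.length : Int) - 1 →
      (∀ i : Nat, (hi : i < ds.length) → (r < (i : Int)) → 0 < ds[i] →
        ∀ s ∈ (ds.drop l.toNat).filter (fun d => decide (d < 0)), target < s + ds[i]) →
      pvLoopA ds target l r best result =
        (((ds.drop l.toNat).filter (fun d => decide (d < 0))).foldl
          (fun st s => pvStepB target s st (ds.filter (fun d => decide (0 < d))))
          (best, result)).2 := by
  intro fuel
  induction fuel with
  | zero =>
    intro l r best result hfuel hl hr Hexcl
    have hng : ¬ (l < r ∧ PySem.List.pyGetD ds l 0 < 0 ∧ 0 < PySem.List.pyGetD ds r 0) := by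
      rintro ⟨h1, -, -⟩; omega
    rw [pvLoopA, dif_neg hng, pvLoopA_exit ds target hpw best result hl hr Hexcl hng]
  | succ fuel ih =>
    intro l r best result hfuel hl hr Hexcl
    rw [pvLoopA]
    by_cases hg : l < r ∧ PySem.List.pyGetD ds l 0 < 0 ∧ 0 < PySem.List.pyGetD ds r 0
    · rw [dif_pos hg]
      obtain ⟨hlr, hneg, hpos⟩ := hg
      have hlnat : l.toNat < ds.length := by omega
      have hrnat : r.toNat < ds.length := by omega
      have el : PySem.List.pyGetD ds l 0 = ds[l.toNat] :=
        PySem.List.pyGetD_eq_getElem ds 0 hl (by omega)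
      have er : PySem.List.pyGetD ds r 0 = ds[r.toNat] :=
        PySem.List.pyGetD_eq_getElem ds 0 (by omega) (by omega)
      rw [el] at hneg
      rw [er] at hpos
      rw [el, er]
      have hrem_ge : ∀ s ∈ (ds.drop l.toNat).filter (fun d => decide (d < 0)),
          ds[l.toNat] ≤ s := by
        intro s hs
        exact pvMem_drop_ge hpw hlnat (List.mem_filter.mp hs).1
      by_cases hgt : target < ds[l.toNat] + ds[r.toNat]
      · rw [if_pos hgt]
        apply ih l (r - 1) best result (by omega) hl (by omega)
        intro i hi hri hposi s hs
        by_cases hir : r < (i : Int)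
        · exact Hexcl i hi hir hposi s hs
        · have hieq : (i : Int) = r := by omega
          have : i = r.toNat := by omega
          subst this
          have := hrem_ge s hs
          omega
      · rw [if_neg hgt]
        have hcons : (ds.drop l.toNat).filter (fun d => decide (d < 0)) =
            ds[l.toNat] :: ((ds.drop (l.toNat + 1)).filter (fun d => decide (d < 0))) := by
          rw [List.drop_eq_getElem_cons hlnat, List.filter_cons_of_pos (by simpa using hneg)]
        have hsucc : (l + 1).toNat = l.toNat + 1 := by omega
        -- ds[r] is the largest savory feasible for the current sweet
        have hmem : ds[r.toNat] ∈ ds.filter (fun d => decide (0 < d)) :=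
          List.mem_filter.mpr ⟨List.getElem_mem _, by simpa using hpos⟩
        have hub : ∀ v ∈ ds.filter (fun d => decide (0 < d)),
            ds[l.toNat] + v ≤ target → v ≤ ds[r.toNat] := by
          intro v hv hvf
          have hvds : v ∈ ds := (List.mem_filter.mp hv).1
          have hvpos : 0 < v := by simpa using (List.mem_filter.mp hv).2
          obtain ⟨i, hi, hiv⟩ := List.mem_iff_getElem.mp hvds
          by_cases hir : r < (i : Int)
          · exfalso
            have hhead : ds[l.toNat] ∈ (ds.drop l.toNat).filter (fun d => decide (d < 0)) := by
              rw [hcons]; exact List.mem_cons_self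
            have := Hexcl i hi hir (by omega) ds[l.toNat] hhead
            omega
          · subst hiv
            exact pvSorted_getElem_mono hpw (by omega) hrnat
        have hinner := pvStepB_update target ds[l.toNat] ds[r.toNat]
          (ds.filter (fun d => decide (0 < d)))
          (List.Pairwise.sublist List.filter_sublist hpw)
          (best, result) hmem (by omega) hub
        have Hexcl' : ∀ i : Nat, (hi : i < ds.length) → (r < (i : Int)) → 0 < ds[i] →
            ∀ s ∈ (ds.drop (l + 1).toNat).filter (fun d => decide (d < 0)),
              target < s + ds[i] := by
          intro i hi hri hposi s hs
          apply Hexcl i hi hri hposi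
          rw [hcons]
          rw [hsucc] at hs
          exact List.mem_cons_of_mem _ hs
        rw [hcons, List.foldl_cons, hinner]
        by_cases hbl : pvNoneLt best (ds[l.toNat] + ds[r.toNat]) = true
        · rw [if_pos hbl, if_pos hbl]
          have := ih (l + 1) r (some (ds[l.toNat] + ds[r.toNat]))
            [ds[l.toNat], ds[r.toNat]] (by omega) (by omega) hr Hexcl'
          rw [this, hsucc]
        · rw [if_neg hbl, if_neg hbl]
          have := ih (l + 1) r best result (by omega) (by omega) hr Hexcl'
          rw [this, hsucc]
    · rw [dif_neg hg, pvLoopA_exit ds target hpw best result hl hr Hexcl hg]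

-- ===== VERDICT (by name: the statement is the Claim_ definition above) =====
theorem sweetAndSavory_spec : Claim_equal_sweetAndSavory := by
  intro dishes target _
  unfold Spec_sweetAndSavory sweetAndSavory sweetAndSavory_alt
  have hpw : (PySem.List.sorted dishes (fun x => x) false).Pairwise (· ≤ ·) :=
    PySem.List.sorted_pairwise dishes (fun x => x)
  have h := pvLoopA_eq (PySem.List.sorted dishes (fun x => x) false) target hpw
    (PySem.List.sorted dishes (fun x => x) false).length 0
    (((PySem.List.sorted dishes (fun x => x) false).length : Int) - 1) none [0, 0]
    (by omega) (by omega) (by omega)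
    (by intro i hi hri hposi s hs; exfalso; omega)
  simpa using h
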